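-- pv_equiv track=rewrite | github.com/drcarademono/wod-location-generator | loc-on-roads.py | check_coordinate
-- ===== SOURCE A (Python) =====
-- def get_byte_at_position(data, x, y, width):
--     index = x + (y * width)
--     return data[index]
--
-- def interpret_byte(byte_value):
--     paths = {'N': False, 'NE': False, 'E': False, 'SE': False,
--              'S': False, 'SW': False, 'W': False, 'NW': False}
--
--     if byte_value & 0b10000000:
--         paths['N'] = True
--     if byte_value & 0b01000000:
--         paths['NE'] = True
--     if byte_value & 0b00100000:
--         paths['E'] = True
--     if byte_value & 0b00010000:
--         paths['SE'] = True
--     if byte_value & 0b00001000: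
--         paths['S'] = True
--     if byte_value & 0b00000100:
--         paths['SW'] = True
--     if byte_value & 0b00000010:
--         paths['W'] = True
--     if byte_value & 0b00000001:
--         paths['NW'] = True
--
--     return paths
--
-- def check_coordinate(x, y, road_data, track_data, width):
--     road_byte = get_byte_at_position(road_data, x, y, width)
--     track_byte = get_byte_at_position(track_data, x, y, width)
--
--     road_paths = interpret_byte(road_byte)
--     track_paths = interpret_byte(track_byte)
--
--     combined_paths = {k: road_paths[k] or track_paths[k] for k in road_paths}
--     has_any_path = any(combined_paths.values())
--     return combined_paths, has_any_path
-- ===== SOURCE B (Python) =====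
-- def check_coordinate(x, y, road_data, track_data, width):
--     idx = x + y * width
--     combined = road_data[idx] | track_data[idx]
--     bits = []
--     for _ in range(8):
--         bits.append(combined % 2 == 1)
--         combined //= 2
--     names = ['N', 'NE', 'E', 'SE', 'S', 'SW', 'W', 'NW']
--     combined_paths = dict(zip(names, reversed(bits)))
--     return combined_paths, any(combined_paths.values())
-- ===== Notes on version B (the rewrite author's own statement) =====
-- stated objective: alternative
-- what changed: B replaces A's two eight-branch mask-test interpretations plus per-key dict merge by ORing the bytes and peeling the 8 low bits arithmetically with a %2 / //=2 accumulator loop, then zipping the direction names with the reversed bit list; has_any_path is still read from the dict values so ints above 255 behave identically.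
import Mathlib
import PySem

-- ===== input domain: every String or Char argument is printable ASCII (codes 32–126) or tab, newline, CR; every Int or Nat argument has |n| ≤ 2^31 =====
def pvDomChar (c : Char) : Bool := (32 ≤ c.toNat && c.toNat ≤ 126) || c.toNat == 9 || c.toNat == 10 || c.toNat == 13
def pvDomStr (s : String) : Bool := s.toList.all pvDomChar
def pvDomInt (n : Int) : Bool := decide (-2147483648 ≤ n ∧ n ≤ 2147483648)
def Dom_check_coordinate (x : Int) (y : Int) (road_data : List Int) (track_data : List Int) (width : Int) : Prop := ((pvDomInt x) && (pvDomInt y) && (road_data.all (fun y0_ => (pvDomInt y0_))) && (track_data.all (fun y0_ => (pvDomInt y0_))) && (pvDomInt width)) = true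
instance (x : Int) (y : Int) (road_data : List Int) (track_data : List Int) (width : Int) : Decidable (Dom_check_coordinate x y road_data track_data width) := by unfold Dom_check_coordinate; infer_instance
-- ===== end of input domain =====

-- B ORs the two bytes first and peels the 8 low bits arithmetically with a %2 / //2
-- accumulator loop, zipping the direction names with the reversed bit list, instead of
-- A's two eight-branch mask interpretations followed by a per-key merge; has_any_path is
-- still read off the resulting dict values.


-- ===== PORT A =====
-- data[x + y*width]; the total form pyGetD is used ONLY under Pre_ (index in range for both lists)
def get_byte_at_position (data : List Int) (x : Int) (y : Int) (width : Int) : Int :=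
  PySem.List.pyGetD data (x + y * width) 0

def interpret_byte (byte_value : Int) : PySem.Dict String Bool :=
  let paths : PySem.Dict String Bool := PySem.Dict.ofList
    [("N", false), ("NE", false), ("E", false), ("SE", false),
     ("S", false), ("SW", false), ("W", false), ("NW", false)]
  let paths := if PySem.Int.band byte_value 128 ≠ 0 then paths.insert "N" true else paths
  let paths := if PySem.Int.band byte_value 64 ≠ 0 then paths.insert "NE" true else paths
  let paths := if PySem.Int.band byte_value 32 ≠ 0 then paths.insert "E" true else paths
  let paths := if PySem.Int.band byte_value 16 ≠ 0 then paths.insert "SE" true else paths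
  let paths := if PySem.Int.band byte_value 8 ≠ 0 then paths.insert "S" true else paths
  let paths := if PySem.Int.band byte_value 4 ≠ 0 then paths.insert "SW" true else paths
  let paths := if PySem.Int.band byte_value 2 ≠ 0 then paths.insert "W" true else paths
  let paths := if PySem.Int.band byte_value 1 ≠ 0 then paths.insert "NW" true else paths
  paths

def check_coordinate (x : Int) (y : Int) (road_data : List Int) (track_data : List Int) (width : Int) : (List (String × Bool)) × Bool :=
  let road_byte := get_byte_at_position road_data x y width
  let track_byte := get_byte_at_position track_data x y width
  let road_paths := interpret_byte road_byte
  let track_paths := interpret_byte track_byte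
  let combined_paths : PySem.Dict String Bool := PySem.Dict.ofList
    (road_paths.keys.map (fun k => (k, road_paths.getD k false || track_paths.getD k false)))
  (combined_paths.items, combined_paths.values.any (fun v => v))

-- ===== PORT B =====
def check_coordinate_alt (x : Int) (y : Int) (road_data : List Int) (track_data : List Int) (width : Int) : (List (String × Bool)) × Bool :=
  let idx := x + y * width
  let combined := PySem.Int.bor (PySem.List.pyGetD road_data idx 0) (PySem.List.pyGetD track_data idx 0)
  -- for _ in range(8): bits.append(combined % 2 == 1); combined //= 2
  let st := (List.range 8).foldl
      (fun (st : List Bool × Int) _ =>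
        (st.1 ++ [PySem.Int.mod st.2 2 == 1], PySem.Int.floordiv st.2 2)) ([], combined)
  let bits := st.1
  let names := ["N", "NE", "E", "SE", "S", "SW", "W", "NW"]
  let combined_paths : PySem.Dict String Bool := PySem.Dict.ofList (List.zip names bits.reverse)
  (combined_paths.items, combined_paths.values.any (fun v => v))

-- ===== PRECONDITION & SPEC =====
-- A raises IndexError iff x + y*width is out of range for either list; exactly those inputs are excluded.
def Pre_check_coordinate (x : Int) (y : Int) (road_data : List Int) (track_data : List Int) (width : Int) : Prop :=
  PySem.Raise.InRange road_data.length (x + y * width) ∧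
  PySem.Raise.InRange track_data.length (x + y * width)
instance (x : Int) (y : Int) (road_data : List Int) (track_data : List Int) (width : Int) : Decidable (Pre_check_coordinate x y road_data track_data width) := by unfold Pre_check_coordinate; infer_instance

def pvWitness_check_coordinate : Int × Int × List Int × List Int × Int := (0, 0, [129], [66], 1)

def Spec_check_coordinate (x : Int) (y : Int) (road_data : List Int) (track_data : List Int) (width : Int) (out : (List (String × Bool)) × Bool) : Prop := out = check_coordinate_alt x y road_data track_data width
instance (x : Int) (y : Int) (road_data : List Int) (track_data : List Int) (width : Int) (out : (List (String × Bool)) × Bool) : Decidable (Spec_check_coordinate x y road_data track_data width out) := by unfold Spec_check_coordinate; infer_instance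

-- ===== CLAIM (what is proved, stated in full; the proofs are below) =====
def Claim_equal_check_coordinate : Prop := ∀ (x : Int) (y : Int) (road_data : List Int) (track_data : List Int) (width : Int), Dom_check_coordinate x y road_data track_data width → Pre_check_coordinate x y road_data track_data width → Spec_check_coordinate x y road_data track_data width (check_coordinate x y road_data track_data width)

-- ===== LEMMAS AND PROOFS =====

-- a - (a &&& b) is the bitwise set difference (the shape PySem's two's-complement band/bor produce)
lemma pv_sub_and_eq_ldiff (a b : Nat) : a - (a &&& b) = Nat.ldiff a b := by
  induction a using Nat.binaryRec generalizing b with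
  | zero => simp [Nat.ldiff]
  | bit xb xa ih =>
    conv_lhs => rw [← Nat.bit_bodd_div2 b]
    conv_rhs => rw [← Nat.bit_bodd_div2 b]
    rw [Nat.land_bit, Nat.ldiff_bit, ← ih]
    have hle : xa &&& Nat.div2 b ≤ xa := Nat.and_le_left
    cases xb <;> cases Nat.bodd b <;> simp [Nat.bit_val] <;> omega

lemma pv_band_two_pow_nonneg (a : Int) (ha : 0 ≤ a) (k : Nat) :
    PySem.Int.band a ((2 ^ k : Nat) : Int) = 0 ↔ a.toNat.testBit k = false := by
  have h2 : (0 : Int) ≤ ((2 ^ k : Nat) : Int) := by positivity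
  simp only [PySem.Int.band, if_pos ha, if_pos h2, Int.toNat_natCast]
  rw [Nat.and_two_pow]
  have hp : 0 < 2 ^ k := Nat.two_pow_pos k
  cases h : a.toNat.testBit k <;> simp

lemma pv_band_two_pow_neg (a : Int) (ha : ¬ 0 ≤ a) (k : Nat) :
    PySem.Int.band a ((2 ^ k : Nat) : Int) = 0 ↔ (-a - 1).toNat.testBit k = true := by
  have h2 : (0 : Int) ≤ ((2 ^ k : Nat) : Int) := by positivity
  simp only [PySem.Int.band, if_neg ha, if_pos h2, Int.toNat_natCast]
  rw [Nat.two_pow_and]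
  have hp : 0 < 2 ^ k := Nat.two_pow_pos k
  cases h : (-a - 1).toNat.testBit k <;> simp

lemma pv_key (r t : Int) (k : Nat) :
    PySem.Int.band (PySem.Int.bor r t) ((2 ^ k : Nat) : Int) = 0 ↔
    (PySem.Int.band r ((2 ^ k : Nat) : Int) = 0 ∧ PySem.Int.band t ((2 ^ k : Nat) : Int) = 0) := by
  by_cases hr : 0 ≤ r <;> by_cases ht : 0 ≤ t
  · rw [pv_band_two_pow_nonneg r hr, pv_band_two_pow_nonneg t ht,
        pv_band_two_pow_nonneg (PySem.Int.bor r t) (by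
          simp only [PySem.Int.bor, if_pos hr, if_pos ht]; positivity)]
    simp only [PySem.Int.bor, if_pos hr, if_pos ht, Int.toNat_natCast, Nat.testBit_lor]
    cases h1 : r.toNat.testBit k <;> cases h2 : t.toNat.testBit k <;> simp
  · have hneg : ¬ (0 : Int) ≤ PySem.Int.bor r t := by
      simp only [PySem.Int.bor, if_pos hr, if_neg ht]; omega
    rw [pv_band_two_pow_nonneg r hr, pv_band_two_pow_neg t ht, pv_band_two_pow_neg _ hneg]
    have hu : (-(PySem.Int.bor r t) - 1).toNat = (-t - 1).toNat - ((-t - 1).toNat &&& r.toNat) := by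
      simp only [PySem.Int.bor, if_pos hr, if_neg ht]; omega
    rw [hu, pv_sub_and_eq_ldiff, Nat.testBit_ldiff]
    cases h1 : r.toNat.testBit k <;> cases h2 : (-t - 1).toNat.testBit k <;> simp
  · have hneg : ¬ (0 : Int) ≤ PySem.Int.bor r t := by
      simp only [PySem.Int.bor, if_neg hr, if_pos ht]; omega
    rw [pv_band_two_pow_neg r hr, pv_band_two_pow_nonneg t ht, pv_band_two_pow_neg _ hneg]
    have hu : (-(PySem.Int.bor r t) - 1).toNat = (-r - 1).toNat - ((-r - 1).toNat &&& t.toNat) := by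
      simp only [PySem.Int.bor, if_neg hr, if_pos ht]; omega
    rw [hu, pv_sub_and_eq_ldiff, Nat.testBit_ldiff]
    cases h1 : (-r - 1).toNat.testBit k <;> cases h2 : t.toNat.testBit k <;> simp
  · have hneg : ¬ (0 : Int) ≤ PySem.Int.bor r t := by
      simp only [PySem.Int.bor, if_neg hr, if_neg ht]; omega
    rw [pv_band_two_pow_neg r hr, pv_band_two_pow_neg t ht, pv_band_two_pow_neg _ hneg]
    have hu : (-(PySem.Int.bor r t) - 1).toNat = (-r - 1).toNat &&& (-t - 1).toNat := by
      simp only [PySem.Int.bor, if_neg hr, if_neg ht]; omega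
    rw [hu, Nat.testBit_land]
    cases h1 : (-r - 1).toNat.testBit k <;> cases h2 : (-t - 1).toNat.testBit k <;> simp

lemma pv_key_bool (r t : Int) (k : Nat) (m : Int) (hm : m = ((2 ^ k : Nat) : Int)) :
    (decide (PySem.Int.band r m ≠ 0) || decide (PySem.Int.band t m ≠ 0)) =
      (PySem.Int.band (PySem.Int.bor r t) m != 0) := by
  subst hm
  rw [Bool.eq_iff_iff]
  simp only [bne_iff_ne, ne_eq, Bool.or_eq_true, decide_eq_true_eq]
  rw [← not_and_or]
  exact (not_iff_not.mpr (pv_key r t k)).symm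

-- iterated floor-halving (the value of B's loop variable after k iterations)
def pvShr (c : Int) : Nat → Int
  | 0 => c
  | k + 1 => PySem.Int.floordiv (pvShr c k) 2

lemma pv_shr_nonneg (c : Int) (hc : 0 ≤ c) (k : Nat) :
    pvShr c k = ((c.toNat / 2 ^ k : Nat) : Int) := by
  induction k with
  | zero => simp [pvShr]; omega
  | succ k ih =>
    rw [pvShr, ih]
    rw [show ((2:Int)) = ((2:Nat):Int) from rfl, PySem.Int.floordiv_natCast]
    congr 1
    rw [Nat.div_div_eq_div_mul, pow_succ]

lemma pv_floordiv_negsucc (m : Nat) :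
    PySem.Int.floordiv (-(m : Int) - 1) 2 = -((m / 2 : Nat) : Int) - 1 := by
  rw [PySem.Int.floordiv_eq_iff_of_pos (by omega)]
  have h := Nat.div_add_mod m 2
  have h2 : m % 2 < 2 := Nat.mod_lt _ (by omega)
  constructor <;> push_cast <;> omega

lemma pv_shr_neg (c : Int) (hc : ¬ 0 ≤ c) (k : Nat) :
    pvShr c k = -(((-c - 1).toNat / 2 ^ k : Nat) : Int) - 1 := by
  induction k with
  | zero => simp [pvShr]; omega
  | succ k ih =>
    rw [pvShr, ih, pv_floordiv_negsucc]
    congr 2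
    rw [Nat.div_div_eq_div_mul, pow_succ]

lemma pv_bit (c : Int) (k : Nat) :
    (PySem.Int.mod (pvShr c k) 2 == 1) = (PySem.Int.band c ((2 ^ k : Nat) : Int) != 0) := by
  rw [Bool.eq_iff_iff, beq_iff_eq, bne_iff_ne]
  by_cases hc : 0 ≤ c
  · rw [pv_shr_nonneg c hc, ne_eq, pv_band_two_pow_nonneg c hc,
        Nat.testBit_eq_decide_div_mod_eq,
        show ((2:Int)) = ((2:Nat):Int) from rfl, PySem.Int.mod_natCast]
    rw [show ((1:Int)) = ((1:Nat):Int) from rfl, Nat.cast_inj]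
    simp
  · rw [pv_shr_neg c hc, ne_eq, pv_band_two_pow_neg c hc, Nat.testBit_eq_decide_div_mod_eq]
    set a : Nat := (-c - 1).toNat / 2 ^ k with ha
    rw [PySem.Int.mod_eq_emod_of_pos (by omega)]
    have h2 : a % 2 < 2 := Nat.mod_lt _ (by omega)
    have he : (-(a:Int) - 1) % 2 = 1 - (a % 2 : Nat) := by
      have := Nat.div_add_mod a 2; push_cast; omega
    rw [he]
    by_cases hb : a % 2 = 1 <;> simp [hb] <;> omega

-- the 8 bit positions, with the nested floordiv shape B's unfolded loop produces
lemma pv_bit0 (c : Int) : (PySem.Int.mod c 2 == 1) = (PySem.Int.band c 1 != 0) := pv_bit c 0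
lemma pv_bit1 (c : Int) : (PySem.Int.mod (PySem.Int.floordiv c 2) 2 == 1) = (PySem.Int.band c 2 != 0) := pv_bit c 1
lemma pv_bit2 (c : Int) : (PySem.Int.mod (PySem.Int.floordiv (PySem.Int.floordiv c 2) 2) 2 == 1) = (PySem.Int.band c 4 != 0) := pv_bit c 2
lemma pv_bit3 (c : Int) : (PySem.Int.mod (PySem.Int.floordiv (PySem.Int.floordiv (PySem.Int.floordiv c 2) 2) 2) 2 == 1) = (PySem.Int.band c 8 != 0) := pv_bit c 3
lemma pv_bit4 (c : Int) : (PySem.Int.mod (PySem.Int.floordiv (PySem.Int.floordiv (PySem.Int.floordiv (PySem.Int.floordiv c 2) 2) 2) 2) 2 == 1) = (PySem.Int.band c 16 != 0) := pv_bit c 4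
lemma pv_bit5 (c : Int) : (PySem.Int.mod (PySem.Int.floordiv (PySem.Int.floordiv (PySem.Int.floordiv (PySem.Int.floordiv (PySem.Int.floordiv c 2) 2) 2) 2) 2) 2 == 1) = (PySem.Int.band c 32 != 0) := pv_bit c 5
lemma pv_bit6 (c : Int) : (PySem.Int.mod (PySem.Int.floordiv (PySem.Int.floordiv (PySem.Int.floordiv (PySem.Int.floordiv (PySem.Int.floordiv (PySem.Int.floordiv c 2) 2) 2) 2) 2) 2) 2 == 1) = (PySem.Int.band c 64 != 0) := pv_bit c 6
lemma pv_bit7 (c : Int) : (PySem.Int.mod (PySem.Int.floordiv (PySem.Int.floordiv (PySem.Int.floordiv (PySem.Int.floordiv (PySem.Int.floordiv (PySem.Int.floordiv (PySem.Int.floordiv c 2) 2) 2) 2) 2) 2) 2) 2 == 1) = (PySem.Int.band c 128 != 0) := pv_bit c 7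

-- one conditional-update step of A's interpret_byte, observed through contains / keys / getD
lemma pv_step_contains' {c : Prop} [Decidable c] (d : PySem.Dict String Bool) (k k' : String) (v : Bool)
    (hc : d.contains k' = true) : ((if c then d.insert k v else d).contains k') = true := by
  split <;> simp [PySem.Dict.contains_insert, hc]

lemma pv_step_keys {c : Prop} [Decidable c] (d : PySem.Dict String Bool) (k : String) (v : Bool)
    (hc : d.contains k = true) : (if c then d.insert k v else d).keys = d.keys := by
  split <;> simp [PySem.Dict.keys_insert_of_contains, hc]

lemma pv_step_getD {c : Prop} [Decidable c] (d : PySem.Dict String Bool) (k k' : String) (v d0 : Bool) :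
    (if c then d.insert k v else d).getD k' d0 = if k' = k ∧ c then v else d.getD k' d0 := by
  by_cases hc : c <;> by_cases hk : k' = k <;> simp [hc, hk, PySem.Dict.getD_insert]

lemma pv_keys_interp (b : Int) :
    (interpret_byte b).keys = ["N", "NE", "E", "SE", "S", "SW", "W", "NW"] := by
  unfold interpret_byte
  rw [pv_step_keys, pv_step_keys, pv_step_keys, pv_step_keys,
      pv_step_keys, pv_step_keys, pv_step_keys, pv_step_keys]
  all_goals (repeat apply pv_step_contains'); all_goals decide

lemma pv_getD_interp_N (b : Int) :
    (interpret_byte b).getD "N" false = decide (PySem.Int.band b 128 ≠ 0) := by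
  unfold interpret_byte
  rw [pv_step_getD, pv_step_getD, pv_step_getD, pv_step_getD,
      pv_step_getD, pv_step_getD, pv_step_getD, pv_step_getD]
  by_cases h : PySem.Int.band b 128 ≠ 0 <;> simp [h] <;> decide

lemma pv_getD_interp_NE (b : Int) :
    (interpret_byte b).getD "NE" false = decide (PySem.Int.band b 64 ≠ 0) := by
  unfold interpret_byte
  rw [pv_step_getD, pv_step_getD, pv_step_getD, pv_step_getD,
      pv_step_getD, pv_step_getD, pv_step_getD, pv_step_getD]
  by_cases h : PySem.Int.band b 64 ≠ 0 <;> simp [h] <;> decide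

lemma pv_getD_interp_E (b : Int) :
    (interpret_byte b).getD "E" false = decide (PySem.Int.band b 32 ≠ 0) := by
  unfold interpret_byte
  rw [pv_step_getD, pv_step_getD, pv_step_getD, pv_step_getD,
      pv_step_getD, pv_step_getD, pv_step_getD, pv_step_getD]
  by_cases h : PySem.Int.band b 32 ≠ 0 <;> simp [h] <;> decide

lemma pv_getD_interp_SE (b : Int) :
    (interpret_byte b).getD "SE" false = decide (PySem.Int.band b 16 ≠ 0) := by
  unfold interpret_byte
  rw [pv_step_getD, pv_step_getD, pv_step_getD, pv_step_getD,
      pv_step_getD, pv_step_getD, pv_step_getD, pv_step_getD]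
  by_cases h : PySem.Int.band b 16 ≠ 0 <;> simp [h] <;> decide

lemma pv_getD_interp_S (b : Int) :
    (interpret_byte b).getD "S" false = decide (PySem.Int.band b 8 ≠ 0) := by
  unfold interpret_byte
  rw [pv_step_getD, pv_step_getD, pv_step_getD, pv_step_getD,
      pv_step_getD, pv_step_getD, pv_step_getD, pv_step_getD]
  by_cases h : PySem.Int.band b 8 ≠ 0 <;> simp [h] <;> decide

lemma pv_getD_interp_SW (b : Int) :
    (interpret_byte b).getD "SW" false = decide (PySem.Int.band b 4 ≠ 0) := by
  unfold interpret_byte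
  rw [pv_step_getD, pv_step_getD, pv_step_getD, pv_step_getD,
      pv_step_getD, pv_step_getD, pv_step_getD, pv_step_getD]
  by_cases h : PySem.Int.band b 4 ≠ 0 <;> simp [h] <;> decide

lemma pv_getD_interp_W (b : Int) :
    (interpret_byte b).getD "W" false = decide (PySem.Int.band b 2 ≠ 0) := by
  unfold interpret_byte
  rw [pv_step_getD, pv_step_getD, pv_step_getD, pv_step_getD,
      pv_step_getD, pv_step_getD, pv_step_getD, pv_step_getD]
  by_cases h : PySem.Int.band b 2 ≠ 0 <;> simp [h] <;> decide

lemma pv_getD_interp_NW (b : Int) :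
    (interpret_byte b).getD "NW" false = decide (PySem.Int.band b 1 ≠ 0) := by
  unfold interpret_byte
  rw [pv_step_getD, pv_step_getD, pv_step_getD, pv_step_getD,
      pv_step_getD, pv_step_getD, pv_step_getD, pv_step_getD]
  by_cases h : PySem.Int.band b 1 ≠ 0 <;> simp [h] <;> decide

-- ===== VERDICT (by name: the statement is the Claim_ definition above) =====
theorem check_coordinate_spec : Claim_equal_check_coordinate := by
  intro x y road_data track_data width _ _
  unfold Spec_check_coordinate
  rw [check_coordinate_alt, show List.range 8 = [0,1,2,3,4,5,6,7] from rfl]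
  simp only [check_coordinate, List.foldl_cons, List.foldl_nil, List.nil_append,
    List.cons_append, List.reverse_cons, List.reverse_nil,
    List.zip, List.zipWith,
    pv_keys_interp, List.map, pv_getD_interp_N, pv_getD_interp_NE, pv_getD_interp_E,
    pv_getD_interp_SE, pv_getD_interp_S, pv_getD_interp_SW, pv_getD_interp_W, pv_getD_interp_NW,
    pv_key_bool _ _ 7 128 (by norm_num), pv_key_bool _ _ 6 64 (by norm_num),
    pv_key_bool _ _ 5 32 (by norm_num), pv_key_bool _ _ 4 16 (by norm_num),
    pv_key_bool _ _ 3 8 (by norm_num), pv_key_bool _ _ 2 4 (by norm_num),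
    pv_key_bool _ _ 1 2 (by norm_num), pv_key_bool _ _ 0 1 (by norm_num),
    ← pv_bit0, ← pv_bit1, ← pv_bit2, ← pv_bit3, ← pv_bit4, ← pv_bit5, ← pv_bit6, ← pv_bit7,
    get_byte_at_position]
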